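-- pv_equiv track=rewrite | github.com/Deven-14/leetcode | 51. N-Queens/solution.py | does_attack
-- ===== SOURCE A (Python) =====
-- def does_attack(n, board, i, j) -> bool:
--     for k in range(0, i):
--         if board[k][j] == "Q":
--             return True
--         left = j-i+k
--         if left >= 0 and board[k][left] == "Q":
--             return True
--         right = j+i-k
--         if right < n and board[k][right] == "Q":
--             return True
--     return False
-- ===== SOURCE B (Python) =====
-- def does_attack(n, board, i, j) -> bool:
--     # queen-centric scan: find each queen in the rows above and test the
--     # attack relation (same column, or |dc| == dr) arithmetically
--     for k in range(i):
--         for c, ch in enumerate(board[k]):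
--             if ch == "Q" and (c == j or abs(c - j) == i - k):
--                 return True
--     return False
-- ===== Notes on version B (the rewrite author's own statement) =====
-- stated objective: alternative
-- what changed: Replaces A's cell-probing (computing the three attacked cells per row and indexing into them) by a queen-centric scan: enumerate every cell of each row above, and for each queen found test the attack relation arithmetically (same column, or |column difference| equals row distance).
-- outside the precondition, e.g. on does_attack(3, ['..Q', '...', '...'], 2, -1): A returns True, B returns False; on does_attack(2, ['..Q', '..'], 1, 1): A returns False, B returns True
import Mathlib
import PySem

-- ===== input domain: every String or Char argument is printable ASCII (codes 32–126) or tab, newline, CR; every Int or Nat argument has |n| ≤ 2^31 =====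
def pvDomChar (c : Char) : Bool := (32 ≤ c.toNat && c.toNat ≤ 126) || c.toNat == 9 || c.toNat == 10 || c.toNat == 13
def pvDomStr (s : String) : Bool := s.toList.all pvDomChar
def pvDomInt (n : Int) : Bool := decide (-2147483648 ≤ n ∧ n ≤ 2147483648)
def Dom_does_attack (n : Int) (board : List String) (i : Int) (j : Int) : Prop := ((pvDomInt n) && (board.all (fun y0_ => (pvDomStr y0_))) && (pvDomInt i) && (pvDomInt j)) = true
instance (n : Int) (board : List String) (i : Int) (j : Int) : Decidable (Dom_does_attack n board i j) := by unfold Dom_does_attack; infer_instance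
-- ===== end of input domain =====

-- B replaces A's per-row probing of three computed cells by a queen-centric scan
-- (enumerate every cell, test the attack relation arithmetically); objective:
-- alternative (not faster: B inspects every cell of the rows above).


-- board[r][c] == "Q" (false where Python would raise; Pre_ keeps such inputs out)
def pvQAt (board : List String) (r c : Int) : Bool :=
  match PySem.List.pyGet? board r with
  | some row =>
    match PySem.Str.pyGet? row c with
    | some ch => ch == 'Q'
    | none => false
  | none => false

-- ===== PORT A =====
def does_attack (n : Int) (board : List String) (i : Int) (j : Int) : Bool :=
  (PySem.List.pyRange 0 i 1).any (fun k =>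
    pvQAt board k j
    || (decide (0 ≤ j - i + k) && pvQAt board k (j - i + k))
    || (decide (j + i - k < n) && pvQAt board k (j + i - k)))

-- ===== PORT B =====
def does_attack_alt (n : Int) (board : List String) (i : Int) (j : Int) : Bool :=
  (PySem.List.pyRange 0 i 1).any (fun k =>
    match PySem.List.pyGet? board k with
    | some row =>
        (PySem.List.enumerate row.toList 0).any (fun p =>
          p.2 == 'Q' && (decide (p.1 = j) || decide (|p.1 - j| = i - k)))
    | none => false)   -- Python raises IndexError here; Pre_ excludes it

-- ===== PRECONDITION & SPEC =====
-- Pre_ restricts to the natural domain of this N-Queens helper: the first i rows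
-- exist and have length n, and 0 ≤ j < n.  It excludes (a) inputs where A raises
-- IndexError (row too short / i beyond the board) and (b) inputs A only survives
-- through Python's negative-index wraparound or through rows longer than n, where
-- A's value is an artefact of its cell probing.
def Pre_does_attack (n : Int) (board : List String) (i : Int) (j : Int) : Prop :=
  i ≤ 0 ∨ (i ≤ (board.length : Int) ∧ 0 ≤ j ∧ j < n ∧
    ∀ k : Nat, k < i.toNat → ((board.getD k "").toList.length : Int) = n)
instance (n : Int) (board : List String) (i : Int) (j : Int) : Decidable (Pre_does_attack n board i j) := by unfold Pre_does_attack; infer_instance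

def pvWitness_does_attack : Int × List String × Int × Int := (3, ["..Q", "Q..", "..."], 2, 1)

def Spec_does_attack (n : Int) (board : List String) (i : Int) (j : Int) (out : Bool) : Prop := out = does_attack_alt n board i j
instance (n : Int) (board : List String) (i : Int) (j : Int) (out : Bool) : Decidable (Spec_does_attack n board i j out) := by unfold Spec_does_attack; infer_instance

-- ===== CLAIM (what is proved, stated in full; the proofs are below) =====
def Claim_equal_does_attack : Prop := ∀ (n : Int) (board : List String) (i : Int) (j : Int), Dom_does_attack n board i j → Pre_does_attack n board i j → Spec_does_attack n board i j (does_attack n board i j)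

-- ===== LEMMAS AND PROOFS =====

lemma pv_enum_any_iff {α : Type} (l : List α) (s : Int) (f : Int × α → Bool) :
    (PySem.List.enumerate l s).any f = true ↔
      ∃ c : Nat, ∃ h : c < l.length, f (s + c, l[c]) = true := by
  induction l generalizing s with
  | nil => simp [PySem.List.enumerate_nil]
  | cons x xs ih =>
    simp only [PySem.List.enumerate_cons, List.any_cons, Bool.or_eq_true, ih]
    constructor
    · rintro (h | ⟨c, hc, h⟩)
      · exact ⟨0, by simp, by simpa using h⟩
      · refine ⟨c + 1, by simpa using Nat.succ_lt_succ hc, ?_⟩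
        simpa [add_assoc, add_comm, add_left_comm] using h
    · rintro ⟨c, hc, h⟩
      cases c with
      | zero => left; simpa using h
      | succ c =>
        right
        refine ⟨c, by simpa using Nat.lt_of_succ_lt_succ hc, ?_⟩
        simpa [add_assoc, add_comm, add_left_comm] using h

lemma pvQAt_iff (board : List String) (k : Int) (row : String) (m : Int)
    (hrow : PySem.List.pyGet? board k = some row) (h0 : 0 ≤ m)
    (hm : m < (row.toList.length : Int)) :
    pvQAt board k m = true ↔ row.toList[m.toNat]'(by omega) = 'Q' := by
  have hget : PySem.List.pyGet? row.toList m = some (row.toList[m.toNat]'(by omega)) :=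
    PySem.List.pyGet?_eq_some_getElem (xs := row.toList) (i := m) h0 (by omega)
  simp [pvQAt, hrow, hget]

lemma pv_ports_eq (n : Int) (board : List String) (i : Int) (j : Int)
    (hpre : Pre_does_attack n board i j) :
    does_attack n board i j = does_attack_alt n board i j := by
  rcases hpre with hi | ⟨hib, hj0, hjn, hlen⟩
  · unfold does_attack does_attack_alt
    rw [PySem.List.pyRange_one_eq_nil hi]
    simp
  · rw [Bool.eq_iff_iff]
    unfold does_attack does_attack_alt
    simp only [List.any_eq_true, PySem.List.mem_pyRange_one]
    constructor
    · rintro ⟨k, ⟨hk0, hki⟩, hbody⟩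
      refine ⟨k, ⟨hk0, hki⟩, ?_⟩
      have hk : k.toNat < board.length := by omega
      have hrow : PySem.List.pyGet? board k = some (board[k.toNat]'hk) :=
        PySem.List.pyGet?_eq_some_getElem (xs := board) (i := k) hk0 (by omega)
      set row := board[k.toNat]'hk with hrowdef
      have hlenk : ((row.toList.length : Int)) = n := by
        have := hlen k.toNat (by omega)
        simpa [List.getD, List.getElem?_eq_getElem hk, hrowdef] using this
      rw [hrow]
      rw [pv_enum_any_iff]
      simp only [Bool.or_eq_true, Bool.and_eq_true, decide_eq_true_eq] at hbody
      rcases hbody with (hq | ⟨hg, hq⟩) | ⟨hg, hq⟩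
      · -- column: queen at c = j
        rw [pvQAt_iff board k row j hrow hj0 (by omega)] at hq
        refine ⟨j.toNat, by omega, ?_⟩
        simp only [zero_add, Bool.and_eq_true, Bool.or_eq_true, decide_eq_true_eq, beq_iff_eq]
        exact ⟨hq, Or.inl (by omega)⟩
      · -- up-left: queen at c = j - i + k
        rw [pvQAt_iff board k row _ hrow hg (by omega)] at hq
        refine ⟨(j - i + k).toNat, by omega, ?_⟩
        simp only [zero_add, Bool.and_eq_true, Bool.or_eq_true, decide_eq_true_eq, beq_iff_eq]
        refine ⟨hq, Or.inr ?_⟩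
        rw [show (((j - i + k).toNat : Int)) = j - i + k by omega,
          abs_of_nonpos (by omega)]
        omega
      · -- up-right: queen at c = j + i - k
        rw [pvQAt_iff board k row _ hrow (by omega) (by omega)] at hq
        refine ⟨(j + i - k).toNat, by omega, ?_⟩
        simp only [zero_add, Bool.and_eq_true, Bool.or_eq_true, decide_eq_true_eq, beq_iff_eq]
        refine ⟨hq, Or.inr ?_⟩
        rw [show (((j + i - k).toNat : Int)) = j + i - k by omega,
          abs_of_nonneg (by omega)]
        omega
    · rintro ⟨k, ⟨hk0, hki⟩, hbody⟩
      refine ⟨k, ⟨hk0, hki⟩, ?_⟩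
      have hk : k.toNat < board.length := by omega
      have hrow : PySem.List.pyGet? board k = some (board[k.toNat]'hk) :=
        PySem.List.pyGet?_eq_some_getElem (xs := board) (i := k) hk0 (by omega)
      set row := board[k.toNat]'hk with hrowdef
      have hlenk : ((row.toList.length : Int)) = n := by
        have := hlen k.toNat (by omega)
        simpa [List.getD, List.getElem?_eq_getElem hk, hrowdef] using this
      rw [hrow] at hbody
      rw [pv_enum_any_iff] at hbody
      obtain ⟨c, hc, hf⟩ := hbody
      simp only [zero_add, Bool.or_eq_true, Bool.and_eq_true, decide_eq_true_eq,
        beq_iff_eq] at hf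
      obtain ⟨hq, hcase⟩ := hf
      simp only [Bool.or_eq_true, Bool.and_eq_true, decide_eq_true_eq]
      rcases hcase with hcj | habs
      · -- queen in the same column
        left; left
        rw [pvQAt_iff board k row j hrow hj0 (by omega)]
        exact (by congr 1 <;> omega : row.toList[j.toNat]'(by omega) = row.toList[c]'hc).trans hq
      · rcases abs_cases ((c : Int) - j) with ⟨he, _⟩ | ⟨he, _⟩ <;> rw [he] at habs
        · -- queen up-right: c = j + (i - k)
          right
          refine ⟨by omega, ?_⟩
          rw [pvQAt_iff board k row _ hrow (by omega) (by omega)]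
          exact (by congr 1 <;> omega :
            row.toList[(j + i - k).toNat]'(by omega) = row.toList[c]'hc).trans hq
        · -- queen up-left: c = j - (i - k)
          left; right
          refine ⟨by omega, ?_⟩
          rw [pvQAt_iff board k row _ hrow (by omega) (by omega)]
          exact (by congr 1 <;> omega :
            row.toList[(j - i + k).toNat]'(by omega) = row.toList[c]'hc).trans hq

-- ===== VERDICT (by name: the statement is the Claim_ definition above) =====
theorem does_attack_spec : Claim_equal_does_attack := by
  intro n board i j _ hpre
  unfold Spec_does_attack
  exact pv_ports_eq n board i j hpre
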